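-- pv_equiv track=rewrite | github.com/miralemomerika/restaurant-opening-hours | core/utils.py | parse_days
-- ===== SOURCE A (Python) =====
-- DAY_ABBREVIATIONS = {
--     'Mon': 'Monday',
--     'Tue': 'Tuesday',
--     'Wed': 'Wednesday',
--     'Thu': 'Thursday',
--     'Fri': 'Friday',
--     'Sat': 'Saturday',
--     'Sun': 'Sunday',
-- }
--
-- def parse_days(days_str):
--     days = []
--     parts = [part.strip() for part in days_str.split(',')]
--     day_order = list(DAY_ABBREVIATIONS.keys())
--     for part in parts:
--         # Handle ranges like 'Mon-Fri'
--         if '-' in part: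
--             start_day_abbr, end_day_abbr = [d.strip()[:3] for d in part.split('-')]
--             try:
--                 start_index = day_order.index(start_day_abbr)
--                 end_index = day_order.index(end_day_abbr)
--             except ValueError:
--                 continue  # Skip if day abbreviation is invalid
--             # Handle wrap-around weeks
--             if end_index < start_index:
--                 # The range wraps around the week
--                 indices = list(range(start_index, len(day_order))) + list(range(0, end_index + 1))
--             else:
--                 indices = range(start_index, end_index + 1)
--             for i in indices:
--                 day_abbr = day_order[i]
--                 day_full = DAY_ABBREVIATIONS.get(day_abbr)
--                 if day_full:
--                     days.append(day_full)
--         else: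
--             single_day = DAY_ABBREVIATIONS.get(part[:3])
--             days.append(single_day) if single_day else None
--     return days
-- ===== SOURCE B (Python) =====
-- _WEEK = ['Monday', 'Tuesday', 'Wednesday', 'Thursday', 'Friday', 'Saturday', 'Sunday']
-- _WEEK2 = _WEEK + _WEEK          # doubled week: any range is one contiguous slice of it
-- _PACKED = 'MonTueWedThuFriSatSun'
--
--
-- def _day_index(s):
--     """Day number of an abbreviation, found by its position in the packed string."""
--     abbr = s[:3]
--     pos = _PACKED.find(abbr)
--     return pos // 3 if len(abbr) == 3 and pos >= 0 and pos % 3 == 0 else None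
--
--
-- def _expand(part):
--     """Full day names denoted by one comma-separated token (already stripped)."""
--     if '-' in part:
--         bounds = part.split('-')
--         if len(bounds) == 2:
--             i = _day_index(bounds[0].strip())
--             j = _day_index(bounds[1].strip())
--             if i is not None and j is not None:
--                 return _WEEK2[i : i + (j - i) % 7 + 1]
--         return []
--     i = _day_index(part)
--     return [_WEEK2[i]] if i is not None else []
--
--
-- def parse_days(days_str):
--     return [day for part in days_str.split(',') for day in _expand(part.strip())]
-- ===== Notes on version B (the rewrite author's own statement) =====
-- stated objective: alternative
-- what changed: Output becomes one flat comprehension over a pure per-part expander; the wrap-around if/else with two index loops is replaced by a single slice of a doubled 14-name week table, and day lookup uses the abbreviation's position in a packed 'MonTueWed...' string instead of dict/list.index.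
-- crash fix: On inputs where a comma part contains two or more dashes A raises ValueError (unpacking part.split('-') into two variables); B's expander returns no days for such a malformed part, so parse_days returns the days parsed from the other parts. — e.g. on parse_days("Mon--Fri"): A raises ValueError, B returns []
import Mathlib
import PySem

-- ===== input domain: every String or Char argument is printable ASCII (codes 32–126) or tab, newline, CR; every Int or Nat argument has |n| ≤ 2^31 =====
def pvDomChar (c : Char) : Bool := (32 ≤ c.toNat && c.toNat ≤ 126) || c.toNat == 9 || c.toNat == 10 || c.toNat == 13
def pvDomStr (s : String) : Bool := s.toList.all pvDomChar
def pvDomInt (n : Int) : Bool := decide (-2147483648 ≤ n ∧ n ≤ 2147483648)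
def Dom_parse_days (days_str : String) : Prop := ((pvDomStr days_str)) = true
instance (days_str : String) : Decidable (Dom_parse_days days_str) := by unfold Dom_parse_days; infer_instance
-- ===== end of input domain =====

-- B builds the result as one flat comprehension over a pure per-part expander: a range becomes
-- a single slice of a doubled 14-name week table (no index loop, no wrap-around if/else) and a
-- day is looked up by its position in the packed string 'MonTueWedThuFriSatSun' (alternative).

-- ===== PORT A =====
-- module constant DAY_ABBREVIATIONS
def pvDayDict : PySem.Dict String String :=
  PySem.Dict.mk [("Mon","Monday"),("Tue","Tuesday"),("Wed","Wednesday"),("Thu","Thursday"),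
                 ("Fri","Friday"),("Sat","Saturday"),("Sun","Sunday")]

-- port of A, step for step; str.split is PySem.Str.split? (never none: the separators are
-- nonempty literals); the `| _ => days` arm of the split-'-' match is where the Python
-- two-variable unpacking raises ValueError (excluded by Pre_parse_days)
def parse_days (days_str : String) : List String :=
  let parts := ((PySem.Str.split? days_str ",").getD []).map PySem.Str.strip
  let day_order := PySem.Dict.keys pvDayDict
  parts.foldl (fun days part =>
    if PySem.Str.isIn "-" part then
      match ((PySem.Str.split? part "-").getD []).map
              (fun d => PySem.Str.slice (PySem.Str.strip d) none (some 3)) with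
      | [start_day_abbr, end_day_abbr] =>
        match PySem.List.index? day_order start_day_abbr,
              PySem.List.index? day_order end_day_abbr with
        | some start_index, some end_index =>
          let indices :=
            if end_index < start_index then
              PySem.List.pyRange (start_index : Int) ((day_order.length : Nat) : Int) 1 ++
                PySem.List.pyRange 0 ((end_index : Int) + 1) 1
            else
              PySem.List.pyRange (start_index : Int) ((end_index : Int) + 1) 1
          indices.foldl (fun days i =>
            match PySem.List.pyGet? day_order i with
            | some day_abbr =>
              match PySem.Dict.get? pvDayDict day_abbr with
              | some day_full => if day_full = "" then days else days ++ [day_full]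
              | none => days
            | none => days) days
        | _, _ => days  -- .index raised ValueError: continue
      | _ => days  -- unpacking raises ValueError in Python: outside Pre_
    else
      match PySem.Dict.get? pvDayDict (PySem.Str.slice part none (some 3)) with
      | some single_day => if single_day = "" then days else days ++ [single_day]
      | none => days) []

-- ===== PORT B =====
-- module constants _WEEK, _WEEK2 and _PACKED of Source B
def pvWeek : List String :=
  ["Monday","Tuesday","Wednesday","Thursday","Friday","Saturday","Sunday"]
def pvWeek2 : List String := pvWeek ++ pvWeek
def pvPacked : String := "MonTueWedThuFriSatSun"

-- port of Source B's _day_index; 'pos // 3 if … else None' is the if/else below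
def pvDayIndex? (s : String) : Option Int :=
  let abbr := PySem.Str.slice s none (some 3)
  let pos := PySem.Str.find pvPacked abbr
  if PySem.Str.len abbr = 3 ∧ 0 ≤ pos ∧ PySem.Int.mod pos 3 = 0 then
    some (PySem.Int.floordiv pos 3)
  else none

-- port of Source B's _expand; the 'if len(bounds) == 2' guard and the two 'is not None' tests
-- are the match arms; _WEEK2[i] is always in range (i ∈ 0..6), ported with pyGetD
def pvExpand (part : String) : List String :=
  if PySem.Str.isIn "-" part then
    let bounds := (PySem.Str.split? part "-").getD []
    if bounds.length == 2 then
      let i? := pvDayIndex? (PySem.Str.strip (PySem.List.pyGetD bounds 0 ""))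
      let j? := pvDayIndex? (PySem.Str.strip (PySem.List.pyGetD bounds 1 ""))
      if i?.isSome ∧ j?.isSome then
        let i := i?.getD 0
        let j := j?.getD 0
        PySem.List.slice pvWeek2 (some i) (some (i + PySem.Int.mod (j - i) 7 + 1))
      else []
    else []
  else
    let i? := pvDayIndex? part
    if i?.isSome then [PySem.List.pyGetD pvWeek2 (i?.getD 0) ""] else []

-- port of Source B's parse_days: the comprehension is a flatMap
def parse_days_alt (days_str : String) : List String :=
  ((PySem.Str.split? days_str ",").getD []).flatMap
    (fun part => pvExpand (PySem.Str.strip part))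

-- ===== PRECONDITION & SPEC =====
-- Pre_ excludes exactly the inputs where a comma part contains two or more dashes: there the
-- two-variable unpacking of part.split('-') raises ValueError (uncaught) in A.
def Pre_parse_days (days_str : String) : Prop :=
  ∀ p ∈ (PySem.Str.split? days_str ",").getD [], PySem.Str.count p "-" ≤ 1
instance (days_str : String) : Decidable (Pre_parse_days days_str) := by
  unfold Pre_parse_days; infer_instance

def pvWitness_parse_days : String := "Mon, Sat-Tue, xx, Fri"

-- On inputs with a comma part holding two or more dashes A raises ValueError (unpacking
-- part.split('-') into two variables); B's expander yields no days for such a malformed part,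
-- so B returns the days parsed from the other parts.
def Raises_parse_days (days_str : String) : Prop :=
  ∃ p ∈ (PySem.Str.split? days_str ",").getD [], 2 ≤ PySem.Str.count p "-"
instance (days_str : String) : Decidable (Raises_parse_days days_str) := by
  unfold Raises_parse_days; infer_instance
def pvRaiseWitness_parse_days : String := "Mon--Fri"
def pvRaiseWitnessOut_parse_days : List String := []

def Spec_parse_days (days_str : String) (out : List String) : Prop := out = parse_days_alt days_str
instance (days_str : String) (out : List String) : Decidable (Spec_parse_days days_str out) := by
  unfold Spec_parse_days; infer_instance

-- ===== CLAIM (what is proved, stated in full; the proofs are below) =====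
def Claim_equal_parse_days : Prop := ∀ (days_str : String), Dom_parse_days days_str → Pre_parse_days days_str → Spec_parse_days days_str (parse_days days_str)
def Claim_raises_parse_days : Prop := (∀ (days_str : String), Dom_parse_days days_str → Raises_parse_days days_str → ¬ Pre_parse_days days_str) ∧ (Dom_parse_days (pvRaiseWitness_parse_days) ∧ Raises_parse_days (pvRaiseWitness_parse_days) ∧ parse_days_alt (pvRaiseWitness_parse_days) = pvRaiseWitnessOut_parse_days)

-- ===== LEMMAS AND PROOFS =====

-- what A's inner range loop appends for one index i
def pvEmitA (i : Int) : List String :=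
  match PySem.List.pyGet? (PySem.Dict.keys pvDayDict) i with
  | some day_abbr =>
    match PySem.Dict.get? pvDayDict day_abbr with
    | some day_full => if day_full = "" then [] else [day_full]
    | none => []
  | none => []

-- what A's loop body appends for one (stripped) part
def pvEmitPart (part : String) : List String :=
  if PySem.Str.isIn "-" part then
    match ((PySem.Str.split? part "-").getD []).map
            (fun d => PySem.Str.slice (PySem.Str.strip d) none (some 3)) with
    | [sa, ea] =>
      match PySem.List.index? (PySem.Dict.keys pvDayDict) sa,
            PySem.List.index? (PySem.Dict.keys pvDayDict) ea with
      | some si, some ei =>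
        (if ei < si then
            PySem.List.pyRange (si : Int) (((PySem.Dict.keys pvDayDict).length : Nat) : Int) 1 ++
              PySem.List.pyRange 0 ((ei : Int) + 1) 1
          else PySem.List.pyRange (si : Int) ((ei : Int) + 1) 1).flatMap pvEmitA
      | _, _ => []
    | _ => []
  else
    match PySem.Dict.get? pvDayDict (PySem.Str.slice part none (some 3)) with
    | some single_day => if single_day = "" then [] else [single_day]
    | none => []

-- a 3-char string whose position in the packed string is a nonnegative multiple of 3 is a key
lemma pv_find_key (abbr : String) (hlen : PySem.Str.len abbr = 3)
    (hpos : 0 ≤ PySem.Str.find pvPacked abbr)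
    (hmod : PySem.Int.mod (PySem.Str.find pvPacked abbr) 3 = 0) :
    abbr = "Mon" ∨ abbr = "Tue" ∨ abbr = "Wed" ∨ abbr = "Thu" ∨
    abbr = "Fri" ∨ abbr = "Sat" ∨ abbr = "Sun" := by
  rw [PySem.Str.find_eq] at hpos hmod
  have hlen' : abbr.toList.length = 3 := by
    rw [PySem.Str.len_eq] at hlen; exact_mod_cast hlen
  have h21 : PySem.Chars.find pvPacked.toList abbr.toList ≤ 21 := by
    have := PySem.Chars.find_le_length pvPacked.toList abbr.toList
    simpa [pvPacked] using this
  have hmod' : PySem.Chars.find pvPacked.toList abbr.toList % 3 = 0 := by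
    rw [PySem.Int.mod, Int.fmod_eq_emod] at hmod
    simpa using hmod
  obtain ⟨hpre, -⟩ := PySem.Chars.find_spec hpos
  set p := PySem.Chars.find pvPacked.toList abbr.toList with hp
  obtain ⟨n, hndef⟩ : ∃ n : Nat, p.toNat = n := ⟨_, rfl⟩
  have hn : n ≤ 21 := by omega
  have hnm : n % 3 = 0 := by omega
  have htake := List.prefix_iff_eq_take.mp hpre
  rw [hlen', hndef] at htake
  interval_cases n
  · -- position 0: abbr = "Mon"
    exact Or.inl (String.toList_inj.mp (by rw [htake]; decide))
  · omega
  · omega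
  · -- position 3: abbr = "Tue"
    exact Or.inr (Or.inl (String.toList_inj.mp (by rw [htake]; decide)))
  · omega
  · omega
  · -- position 6: abbr = "Wed"
    exact Or.inr (Or.inr (Or.inl (String.toList_inj.mp (by rw [htake]; decide))))
  · omega
  · omega
  · -- position 9: abbr = "Thu"
    exact Or.inr (Or.inr (Or.inr (Or.inl (String.toList_inj.mp (by rw [htake]; decide)))))
  · omega
  · omega
  · -- position 12: abbr = "Fri"
    exact Or.inr (Or.inr (Or.inr (Or.inr (Or.inl (String.toList_inj.mp (by rw [htake]; decide))))))
  · omega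
  · omega
  · -- position 15: abbr = "Sat"
    exact Or.inr (Or.inr (Or.inr (Or.inr (Or.inr (Or.inl (String.toList_inj.mp (by rw [htake]; decide)))))))
  · omega
  · omega
  · -- position 18: abbr = "Sun"
    exact Or.inr (Or.inr (Or.inr (Or.inr (Or.inr (Or.inr (String.toList_inj.mp (by rw [htake]; decide)))))))
  · omega
  · omega
  · rw [htake] at hlen'; exact absurd hlen' (by decide)

-- B's packed-string lookup agrees with A's list.index on the 3-char abbreviation
lemma pv_index_bridge (abbr : String) :
    (if PySem.Str.len abbr = 3 ∧ 0 ≤ PySem.Str.find pvPacked abbr ∧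
        PySem.Int.mod (PySem.Str.find pvPacked abbr) 3 = 0 then
      some (PySem.Int.floordiv (PySem.Str.find pvPacked abbr) 3)
    else none)
      = (PySem.List.index? (PySem.Dict.keys pvDayDict) abbr).map (fun n => (n : Int)) := by
  by_cases h1 : abbr = "Mon"; · subst h1; decide
  by_cases h2 : abbr = "Tue"; · subst h2; decide
  by_cases h3 : abbr = "Wed"; · subst h3; decide
  by_cases h4 : abbr = "Thu"; · subst h4; decide
  by_cases h5 : abbr = "Fri"; · subst h5; decide
  by_cases h6 : abbr = "Sat"; · subst h6; decide
  by_cases h7 : abbr = "Sun"; · subst h7; decide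
  rw [if_neg, (PySem.List.index?_eq_none_iff _ _).2
        (by simp [pvDayDict, h1, h2, h3, h4, h5, h6, h7])]
  · rfl
  · rintro ⟨ha, hb, hc⟩
    rcases pv_find_key abbr ha hb hc with h|h|h|h|h|h|h <;> simp_all

-- pvDayIndex? in the bridge's terms
lemma pv_dayIndex_eq (s : String) :
    pvDayIndex? s
      = (PySem.List.index? (PySem.Dict.keys pvDayDict)
          (PySem.Str.slice s none (some 3))).map (fun n => (n : Int)) := by
  rw [← pv_index_bridge]; rfl

-- A's full-name dict hit equals fetching the name at the key's index
lemma pv_single_bridge (abbr : String) :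
    (match PySem.Dict.get? pvDayDict abbr with
     | some single_day => if single_day = "" then [] else [single_day]
     | none => ([] : List String))
      = (let i? := (PySem.List.index? (PySem.Dict.keys pvDayDict) abbr).map (fun n => (n : Int))
         if i?.isSome then [PySem.List.pyGetD pvWeek2 (i?.getD 0) ""] else []) := by
  by_cases h1 : abbr = "Mon"; · subst h1; decide
  by_cases h2 : abbr = "Tue"; · subst h2; decide
  by_cases h3 : abbr = "Wed"; · subst h3; decide
  by_cases h4 : abbr = "Thu"; · subst h4; decide
  by_cases h5 : abbr = "Fri"; · subst h5; decide
  by_cases h6 : abbr = "Sat"; · subst h6; decide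
  by_cases h7 : abbr = "Sun"; · subst h7; decide
  rw [(PySem.Dict.get?_eq_none_iff_not_mem_keys _ _).2
        (by simp [pvDayDict, h1, h2, h3, h4, h5, h6, h7]),
      (PySem.List.index?_eq_none_iff _ _).2
        (by simp [pvDayDict, h1, h2, h3, h4, h5, h6, h7])]
  rfl

lemma pv_index_lt (s : String) (n : Nat)
    (h : PySem.List.index? (PySem.Dict.keys pvDayDict) s = some n) : n < 7 := by
  obtain ⟨hk, -, -⟩ := PySem.List.getElem_of_index?_eq_some h
  simpa using hk

-- the 49 concrete (start, end) cases: A's emitted names = B's slice of the doubled week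
lemma pv_ranges_eq : ∀ si : Nat, si < 7 → ∀ ei : Nat, ei < 7 →
    (if ei < si then
        PySem.List.pyRange (si : Int) (((PySem.Dict.keys pvDayDict).length : Nat) : Int) 1 ++
          PySem.List.pyRange 0 ((ei : Int) + 1) 1
      else PySem.List.pyRange (si : Int) ((ei : Int) + 1) 1).flatMap pvEmitA
    = PySem.List.slice pvWeek2 (some (si : Int))
        (some ((si : Int) + PySem.Int.mod ((ei : Int) - (si : Int)) 7 + 1)) := by
  decide

-- per part, A's emission equals B's expander
lemma pv_part_eq (q : String) : pvEmitPart q = pvExpand q := by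
  unfold pvEmitPart pvExpand
  cases hd : PySem.Str.isIn "-" q with
  | false =>
    rw [if_neg (by simp), if_neg (by simp), pv_single_bridge, pv_dayIndex_eq]
  | true =>
    rw [if_pos rfl, if_pos rfl]
    cases hsp : (PySem.Str.split? q "-").getD [] with
    | nil => rfl
    | cons a t =>
      cases t with
      | nil => rfl
      | cons b t2 =>
        cases t2 with
        | cons c rest => rfl
        | nil =>
          simp only [List.map_cons, List.map_nil]
          rw [show PySem.List.pyGetD [a, b] 0 "" = a from rfl,
              show PySem.List.pyGetD [a, b] 1 "" = b from rfl,
              pv_dayIndex_eq, pv_dayIndex_eq]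
          cases hi : PySem.List.index? (PySem.Dict.keys pvDayDict)
              (PySem.Str.slice (PySem.Str.strip a) none (some 3)) with
          | none => simp
          | some si =>
            cases hj : PySem.List.index? (PySem.Dict.keys pvDayDict)
                (PySem.Str.slice (PySem.Str.strip b) none (some 3)) with
            | none => simp
            | some ej =>
              simpa using pv_ranges_eq si (pv_index_lt _ _ hi) ej (pv_index_lt _ _ hj)

-- A's loop body only appends pvEmitPart to the accumulator
lemma pv_bodyA (acc : List String) (part : String) :
    (fun (days : List String) (part : String) =>
      if PySem.Str.isIn "-" part then
        match ((PySem.Str.split? part "-").getD []).map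
                (fun d => PySem.Str.slice (PySem.Str.strip d) none (some 3)) with
        | [start_day_abbr, end_day_abbr] =>
          match PySem.List.index? (PySem.Dict.keys pvDayDict) start_day_abbr,
                PySem.List.index? (PySem.Dict.keys pvDayDict) end_day_abbr with
          | some start_index, some end_index =>
            (if end_index < start_index then
                PySem.List.pyRange (start_index : Int)
                    (((PySem.Dict.keys pvDayDict).length : Nat) : Int) 1 ++
                  PySem.List.pyRange 0 ((end_index : Int) + 1) 1
              else PySem.List.pyRange (start_index : Int) ((end_index : Int) + 1) 1).foldl
              (fun days i =>
                match PySem.List.pyGet? (PySem.Dict.keys pvDayDict) i with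
                | some day_abbr =>
                  match PySem.Dict.get? pvDayDict day_abbr with
                  | some day_full => if day_full = "" then days else days ++ [day_full]
                  | none => days
                | none => days) days
          | _, _ => days
        | _ => days
      else
        match PySem.Dict.get? pvDayDict (PySem.Str.slice part none (some 3)) with
        | some single_day => if single_day = "" then days else days ++ [single_day]
        | none => days) acc part
      = acc ++ pvEmitPart part := by
  have hbody : ∀ (d : List String) (i : Int),
      (fun (days : List String) (i : Int) =>
        match PySem.List.pyGet? (PySem.Dict.keys pvDayDict) i with
        | some day_abbr =>
          match PySem.Dict.get? pvDayDict day_abbr with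
          | some day_full => if day_full = "" then days else days ++ [day_full]
          | none => days
        | none => days) d i = d ++ pvEmitA i := by
    intro d i
    simp only [pvEmitA]
    rcases PySem.List.pyGet? (PySem.Dict.keys pvDayDict) i with _ | ab
    · simp
    · rcases h2 : PySem.Dict.get? pvDayDict ab with _ | full
      · simp [h2]
      · by_cases hf : full = "" <;> simp [h2, hf]
  beta_reduce
  unfold pvEmitPart
  cases hd : PySem.Str.isIn "-" part with
  | false =>
    rw [if_neg (by simp), if_neg (by simp)]
    rcases h2 : PySem.Dict.get? pvDayDict (PySem.Str.slice part none (some 3)) with _ | full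
    · simp
    · by_cases hf : full = "" <;> simp [hf]
  | true =>
    rw [if_pos rfl, if_pos rfl]
    cases hsp : (PySem.Str.split? part "-").getD [] with
    | nil => simp
    | cons a t =>
      cases t with
      | nil => simp
      | cons b t2 =>
        cases t2 with
        | cons c rest => simp
        | nil =>
          simp only [List.map_cons, List.map_nil]
          cases hi : PySem.List.index? (PySem.Dict.keys pvDayDict)
              (PySem.Str.slice (PySem.Str.strip a) none (some 3)) with
          | none => simp
          | some si =>
            cases hj : PySem.List.index? (PySem.Dict.keys pvDayDict)
                (PySem.Str.slice (PySem.Str.strip b) none (some 3)) with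
            | none => simp
            | some ej =>
              simp only []
              rw [PySem.List.foldl_congr_mem _ _ _ _ (fun d i _ => hbody d i),
                  PySem.List.foldl_append_eq_flatMap]

-- ===== VERDICT (by name: the statement is the Claim_ definition above) =====
set_option maxHeartbeats 1000000 in
theorem parse_days_spec : Claim_equal_parse_days := by
  intro days_str _ _
  unfold Spec_parse_days parse_days parse_days_alt
  rw [List.foldl_map,
      PySem.List.foldl_congr_mem _ _
        (fun acc p => acc ++ pvEmitPart (PySem.Str.strip p)) []
        (fun acc p _ => pv_bodyA acc (PySem.Str.strip p)),
      PySem.List.foldl_append_eq_flatMap]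
  simp only [pv_part_eq]
  rfl

@[simp] theorem parse_days_raises : Claim_raises_parse_days := by
  unfold Claim_raises_parse_days
  refine ⟨?_, by decide⟩
  rintro days_str - ⟨p, hp, h2⟩ hpre
  have := hpre p hp
  omega
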